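-- pv_equiv track=rewrite | github.com/HebeTien0330/parser | core/middle.py | clearNoneValues
-- ===== SOURCE A (Python) =====
-- def clearNoneValues(rowValues):
--     final = []
--     marked = False
--     for value in rowValues[::-1]:
--         if not marked and value is None:
--             continue
--         marked = True
--         final.append(value)
--     return final[::-1]
-- ===== SOURCE B (Python) =====
-- def clearNoneValues(rowValues):
--     end = len(rowValues)
--     while end > 0 and rowValues[end - 1] is None:
--         end -= 1
--     return list(rowValues[:end])
-- ===== Notes on version B (the rewrite author's own statement) =====
-- stated objective: simpler
-- what changed: Instead of walking the reversed list with a 'marked' flag, appending, and reversing again, B scans a cutoff index from the end and returns one slice of the original list.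
import Mathlib
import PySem

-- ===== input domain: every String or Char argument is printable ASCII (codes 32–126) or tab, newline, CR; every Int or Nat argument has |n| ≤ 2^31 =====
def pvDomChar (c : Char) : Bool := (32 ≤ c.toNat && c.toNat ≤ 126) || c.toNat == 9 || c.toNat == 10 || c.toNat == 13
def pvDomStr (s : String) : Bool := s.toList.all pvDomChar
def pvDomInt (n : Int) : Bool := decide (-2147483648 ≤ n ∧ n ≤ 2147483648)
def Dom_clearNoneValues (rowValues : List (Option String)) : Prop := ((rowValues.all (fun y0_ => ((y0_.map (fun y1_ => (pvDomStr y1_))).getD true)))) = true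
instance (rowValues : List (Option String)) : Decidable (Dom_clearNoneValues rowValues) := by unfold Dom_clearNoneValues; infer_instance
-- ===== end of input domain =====

-- B replaces A's reverse-scan-with-flag-append-reverse by a cutoff index from the end and a single slice (objective: simpler).


-- ===== PORT A =====
-- for value in rowValues[::-1]: skip while not marked and value is None; else mark and append; return final[::-1]
def clearNoneValues (rowValues : List (Option String)) : List (Option String) :=
  let st := ((PySem.List.slice? rowValues none none (-1)).getD []).foldl
    (fun (s : List (Option String) × Bool) value =>
      if !s.2 && value == none then s else (s.1 ++ [value], true))
    ([], false)
  (PySem.List.slice? st.1 none none (-1)).getD []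

-- ===== PORT B =====
-- while end > 0 and rowValues[end-1] is None: end -= 1; return rowValues[:end]
def cutoffLoop (rowValues : List (Option String)) : Nat → Nat
  | 0 => 0
  | n + 1 => if rowValues[n]? == some none then cutoffLoop rowValues n else n + 1

def clearNoneValues_alt (rowValues : List (Option String)) : List (Option String) :=
  rowValues.take (cutoffLoop rowValues rowValues.length)

-- ===== PRECONDITION & SPEC =====
def Spec_clearNoneValues (rowValues : List (Option String)) (out : List (Option String)) : Prop := out = clearNoneValues_alt rowValues
instance (rowValues : List (Option String)) (out : List (Option String)) : Decidable (Spec_clearNoneValues rowValues out) := by unfold Spec_clearNoneValues; infer_instance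

-- ===== CLAIM (what is proved, stated in full; the proofs are below) =====
def Claim_equal_clearNoneValues : Prop := ∀ (rowValues : List (Option String)), Dom_clearNoneValues rowValues → Spec_clearNoneValues rowValues (clearNoneValues rowValues)

-- ===== LEMMAS AND PROOFS =====

theorem pvSlice_rev (xs : List (Option String)) :
    (PySem.List.slice? xs none none (-1)).getD [] = xs.reverse := by
  rw [PySem.List.slice?_none_none_neg_one]; rfl

theorem foldA_marked (l acc : List (Option String)) :
    l.foldl (fun (s : List (Option String) × Bool) value =>
      if !s.2 && value == none then s else (s.1 ++ [value], true)) (acc, true)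
    = (acc ++ l, true) := by
  induction l generalizing acc with
  | nil => simp
  | cons v t ih =>
    show t.foldl _ (acc ++ [v], true) = _
    rw [ih (acc ++ [v])]; simp

theorem foldA_fst (l acc : List (Option String)) :
    (l.foldl (fun (s : List (Option String) × Bool) value =>
      if !s.2 && value == none then s else (s.1 ++ [value], true)) (acc, false)).1
    = acc ++ l.dropWhile (fun v => v == none) := by
  induction l generalizing acc with
  | nil => simp
  | cons v t ih =>
    by_cases hv : v = none
    · subst hv; simpa [List.foldl, List.dropWhile] using ih acc
    · rw [List.foldl_cons]
      have h1 : (if (!(false : Bool) && v == none) = true then ((acc, false) : List (Option String) × Bool)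
          else (acc ++ [v], true)) = (acc ++ [v], true) := by simp [hv]
      rw [h1, foldA_marked t (acc ++ [v])]
      obtain ⟨s, rfl⟩ := Option.ne_none_iff_exists'.mp hv
      simp [List.dropWhile]

theorem clearNoneValues_eq (xs : List (Option String)) :
    clearNoneValues xs = ((xs.reverse).dropWhile (fun v => v == none)).reverse := by
  unfold clearNoneValues
  rw [pvSlice_rev xs, pvSlice_rev, foldA_fst]
  simp

theorem cutoffLoop_append (xs ys : List (Option String)) (k : Nat) (hk : k ≤ xs.length) :
    cutoffLoop (xs ++ ys) k = cutoffLoop xs k := by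
  induction k with
  | zero => rfl
  | succ n ih =>
    have hn : n < xs.length := hk
    have : (xs ++ ys)[n]? = xs[n]? := List.getElem?_append_left hn
    simp [cutoffLoop, this, ih (Nat.le_of_lt hn)]

theorem cutoffLoop_le (xs : List (Option String)) (k : Nat) : cutoffLoop xs k ≤ k := by
  induction k with
  | zero => exact Nat.le_refl 0
  | succ n ih =>
    unfold cutoffLoop
    split
    · exact Nat.le_trans ih (Nat.le_succ n)
    · exact Nat.le_refl _

theorem clearNoneValues_alt_eq (xs : List (Option String)) :
    clearNoneValues_alt xs = ((xs.reverse).dropWhile (fun v => v == none)).reverse := by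
  induction xs using List.reverseRecOn with
  | nil => rfl
  | append_singleton t a ih =>
    by_cases ha : a = none
    · subst ha
      have hlen : (t ++ [(none : Option String)]).length = t.length + 1 := by simp
      have hget : (t ++ [(none : Option String)])[t.length]? = some none := by simp
      have hc : cutoffLoop (t ++ [(none : Option String)]) (t.length + 1)
          = cutoffLoop t t.length := by
        rw [show t.length + 1 = t.length + 1 from rfl]
        simp only [cutoffLoop, hget]
        simp [cutoffLoop_append t [none] t.length (Nat.le_refl _)]
      have hle := cutoffLoop_le t t.length
      simp only [clearNoneValues_alt, hlen, hc]
      rw [List.take_append_of_le_length hle]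
      simpa [List.dropWhile] using ih
    · have hlen : (t ++ [a]).length = t.length + 1 := by simp
      have hget : (t ++ [a])[t.length]? = some a := by simp
      have hc : cutoffLoop (t ++ [a]) (t.length + 1) = t.length + 1 := by
        simp only [cutoffLoop, hget]
        simp [ha]
      simp [clearNoneValues_alt, hlen, hc, ha]

-- ===== VERDICT (by name: the statement is the Claim_ definition above) =====
theorem clearNoneValues_spec : Claim_equal_clearNoneValues := by
  intro xs _
  unfold Spec_clearNoneValues
  rw [clearNoneValues_eq, clearNoneValues_alt_eq]
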